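-- pv_equiv track=rewrite | github.com/detrout/doc-central | cgi/docutils.py | stripsection
-- ===== SOURCE A (Python) =====
-- def stripsection(sect, count=1, start=0):
--     "Strip a number of sections from either the front or back of a section-index."
--
--     if start == 0:
--         for i in range(count):
--             sect = sect[sect.find("/")+1:]
--     else:
--         for i in range(count):
--             j = sect.rfind("/")
--             if j == -1:
--                 sect = ""
--             else:
--                 sect = sect[0:sect.rfind("/")]
--     return sect
-- ===== SOURCE B (Python) =====
-- def stripsection(sect, count=1, start=0):
--     "Strip a number of sections from either the front or back of a section-index."
--     parts = sect.split('/')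
--     c = count if count > 0 else 0
--     if start == 0:
--         keep = min(c, len(parts) - 1)
--         return '/'.join(parts[keep:])
--     remaining = len(parts) - c
--     return '/'.join(parts[:remaining]) if remaining > 0 else ''
-- ===== Notes on version B (the rewrite author's own statement) =====
-- stated objective: faster
-- what changed: Replaces the count-bounded loop of repeated find/rfind scans and re-slicing with a single split on the separator followed by index arithmetic and one join.
import Mathlib
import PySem

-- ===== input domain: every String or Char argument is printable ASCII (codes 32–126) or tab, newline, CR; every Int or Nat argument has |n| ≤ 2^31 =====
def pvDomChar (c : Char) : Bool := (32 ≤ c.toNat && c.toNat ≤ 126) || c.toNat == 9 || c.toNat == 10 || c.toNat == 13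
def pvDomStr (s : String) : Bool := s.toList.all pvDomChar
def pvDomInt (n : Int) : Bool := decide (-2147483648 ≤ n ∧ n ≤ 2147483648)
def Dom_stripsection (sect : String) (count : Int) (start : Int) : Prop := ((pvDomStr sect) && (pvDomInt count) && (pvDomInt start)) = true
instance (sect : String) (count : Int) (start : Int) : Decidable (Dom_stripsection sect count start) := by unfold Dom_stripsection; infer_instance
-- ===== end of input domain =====

-- B replaces A's count-bounded loop of repeated find/rfind scans and re-slicing by one split('/'),
-- index arithmetic and one join (objective: simpler).

-- ===== PORT A =====
-- literal port of A: a loop over range(count), each step re-scanning and re-slicing the string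
def stripsection (sect : String) (count : Int) (start : Int) : String :=
  if start == 0 then
    (PySem.List.pyRange 0 count).foldl
      (fun s _ => PySem.Str.slice s (some (PySem.Str.find s "/" + 1)) none) sect
  else
    (PySem.List.pyRange 0 count).foldl
      (fun s _ =>
        let j := PySem.Str.rfind s "/"
        if j == -1 then "" else PySem.Str.slice s (some 0) (some (PySem.Str.rfind s "/"))) sect

-- ===== PORT B =====
-- literal port of Source B: split once, slice the parts list, join once
-- (sect.split('/') is Str.split? with the non-empty separator "/", so the `none` case never occurs; .getD [] discharges the Option)
def stripsection_alt (sect : String) (count : Int) (start : Int) : String :=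
  let parts := (PySem.Str.split? sect "/").getD []
  let c := if count > 0 then count else 0
  if start == 0 then
    let keep := min c ((parts.length : Int) - 1)
    PySem.Str.join "/" (PySem.List.slice parts (some keep) none)
  else
    let remaining := (parts.length : Int) - c
    if remaining > 0 then PySem.Str.join "/" (PySem.List.slice parts none (some remaining)) else ""

-- ===== PRECONDITION & SPEC =====
def Spec_stripsection (sect : String) (count : Int) (start : Int) (out : String) : Prop := out = stripsection_alt sect count start
instance (sect : String) (count : Int) (start : Int) (out : String) : Decidable (Spec_stripsection sect count start out) := by unfold Spec_stripsection; infer_instance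

-- ===== CLAIM (what is proved, stated in full; the proofs are below) =====
def Claim_equal_stripsection : Prop := ∀ (sect : String) (count : Int) (start : Int), Dom_stripsection sect count start → Spec_stripsection sect count start (stripsection sect count start)

-- ===== LEMMAS AND PROOFS =====

-- a simple structural split on '/', used as the common reference for both ports
def mySplit : List Char → List (List Char)
  | [] => [[]]
  | c :: t =>
    if c = '/' then [] :: mySplit t
    else match mySplit t with
         | [] => [[c]]
         | h :: r => (c :: h) :: r

theorem mySplit_ne_nil (cs : List Char) : mySplit cs ≠ [] := by
  cases cs with
  | nil => simp [mySplit]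
  | cons c t =>
    simp only [mySplit]
    split
    · simp
    · cases h : mySplit t <;> simp

theorem splitOn_go_eq (fuel : ℕ) : ∀ (l cur : List Char) (acc : List (List Char)),
    l.length ≤ fuel →
    PySem.Chars.splitOn.go ['/'] fuel l cur acc
      = acc.reverse ++ (mySplit l).modifyHead (cur.reverse ++ ·) := by
  induction fuel with
  | zero =>
    intro l cur acc h
    have : l = [] := by cases l <;> simp_all
    subst this
    simp [PySem.Chars.splitOn.go, mySplit]
  | succ n ih =>
    intro l cur acc h
    cases l with
    | nil => simp [PySem.Chars.splitOn.go, mySplit]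
    | cons c t =>
      by_cases hc : c = '/'
      · subst hc
        rw [PySem.Chars.splitOn.go]
        simp only [List.isPrefixOf, beq_self_eq_true]
        rw [if_pos (by simp)]
        simp only [List.length_cons, List.length_nil, List.drop_succ_cons, List.drop_zero]
        rw [ih t [] ((cur.reverse) :: acc) (by simpa using h)]
        simp only [mySplit]
        cases hmt : mySplit t <;> simp
      · rw [PySem.Chars.splitOn.go]
        rw [if_neg (by simp [List.isPrefixOf]; intro hh; exact absurd hh.symm hc)]
        rw [ih t (c :: cur) acc (by simpa using Nat.le_of_succ_le_succ h)]
        simp only [mySplit, if_neg hc]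
        cases hmt : mySplit t with
        | nil => exact absurd hmt (mySplit_ne_nil t)
        | cons hh rr => simp

theorem splitOn_eq (cs : List Char) : PySem.Chars.splitOn cs ['/'] = mySplit cs := by
  rw [PySem.Chars.splitOn, splitOn_go_eq (cs.length + 1) cs [] [] (by omega)]
  cases h : mySplit cs with
  | nil => exact absurd h (mySplit_ne_nil cs)
  | cons hh rr => simp

theorem mem_mySplit_no_slash (cs : List Char) : ∀ p ∈ mySplit cs, '/' ∉ p := by
  induction cs with
  | nil => simp [mySplit]
  | cons c t ih =>
    by_cases hc : c = '/'
    · subst hc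
      rw [show mySplit ('/' :: t) = [] :: mySplit t from by simp [mySplit]]
      rintro p hp
      rcases List.mem_cons.mp hp with rfl | hp
      · simp
      · exact ih p hp
    · simp only [mySplit, if_neg hc]
      cases hmt : mySplit t with
      | nil => exact absurd hmt (mySplit_ne_nil t)
      | cons hh rr =>
        simp only [List.mem_cons]
        rintro p (rfl | hp)
        · intro hmem
          rcases List.mem_cons.mp hmem with h | h
          · exact hc h.symm
          · exact ih hh (by rw [hmt]; simp) h
        · exact ih p (by rw [hmt]; simp [hp])

theorem join_mySplit (cs : List Char) : PySem.Chars.join ['/'] (mySplit cs) = cs := by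
  induction cs with
  | nil => rw [show mySplit ([] : List Char) = [[]] from rfl, PySem.Chars.join_singleton]
  | cons c t ih =>
    by_cases hc : c = '/'
    · subst hc
      rw [show mySplit ('/' :: t) = [] :: mySplit t from by simp [mySplit]]
      cases hmt : mySplit t with
      | nil => exact absurd hmt (mySplit_ne_nil t)
      | cons hh rr =>
        rw [hmt] at ih
        rw [PySem.Chars.join_cons_cons]
        simpa using ih
    · simp only [mySplit, if_neg hc]
      cases hmt : mySplit t with
      | nil => exact absurd hmt (mySplit_ne_nil t)
      | cons hh rr =>
        rw [hmt] at ih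
        cases rr with
        | nil =>
          rw [PySem.Chars.join_singleton] at ih ⊢
          simp [ih]
        | cons q rr' =>
          rw [PySem.Chars.join_cons_cons] at ih ⊢
          simpa using ih

theorem mySplit_no_slash (p : List Char) (h : '/' ∉ p) : mySplit p = [p] := by
  induction p with
  | nil => simp [mySplit]
  | cons c t ih =>
    simp only [mySplit]
    rw [if_neg (by intro hc; exact h (by simp [hc]))]
    rw [ih (by intro ht; exact h (by simp [ht]))]

theorem mySplit_append_slash (a b : List Char) (h : '/' ∉ a) :
    mySplit (a ++ '/' :: b) = a :: mySplit b := by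
  induction a with
  | nil => simp [mySplit]
  | cons c t ih =>
    simp only [List.cons_append, mySplit]
    rw [if_neg (by intro hc; exact h (by simp [hc]))]
    rw [ih (by intro ht; exact h (by simp [ht]))]

theorem mySplit_join (parts : List (List Char)) (hne : parts ≠ [])
    (hns : ∀ p ∈ parts, '/' ∉ p) :
    mySplit (PySem.Chars.join ['/'] parts) = parts := by
  induction parts with
  | nil => exact absurd rfl hne
  | cons p rest ih =>
    cases rest with
    | nil =>
      rw [PySem.Chars.join_singleton]
      exact mySplit_no_slash p (hns p (by simp))
    | cons q rr =>
      rw [PySem.Chars.join_cons_cons]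
      have : p ++ ['/'] ++ PySem.Chars.join ['/'] (q :: rr)
           = p ++ '/' :: PySem.Chars.join ['/'] (q :: rr) := by simp
      rw [this, mySplit_append_slash p _ (hns p (by simp))]
      rw [ih (by simp) (fun x hx => hns x (by simp [hx]))]


-- ---- find / front-step lemmas ----

theorem find_ge (cs sub : List Char) :
    PySem.Chars.find cs sub = -1 ∨ 0 ≤ PySem.Chars.find cs sub := by
  by_cases h : sub <:+: cs
  · exact Or.inr ((PySem.Chars.find_nonneg_iff cs sub).mpr h)
  · exact Or.inl ((PySem.Chars.find_eq_neg_one_iff cs sub).mpr h)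

theorem find_go_shift (t : List Char) : ∀ k : ℕ,
    PySem.Chars.find.go ['/'] t k =
      if PySem.Chars.find t ['/'] = -1 then -1 else PySem.Chars.find t ['/'] + k := by
  induction t with
  | nil => intro k; simp [PySem.Chars.find.go, PySem.Chars.find]
  | cons c r ih =>
    intro k
    by_cases hc : c = '/'
    · subst hc
      rw [PySem.Chars.find.go]
      rw [if_pos (by simp [List.isPrefixOf])]
      have h0 : PySem.Chars.find ('/' :: r) ['/'] = 0 := by
        rw [PySem.Chars.find, PySem.Chars.find.go, if_pos (by simp [List.isPrefixOf])]
        norm_num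
      rw [h0]
      norm_num
    · have hpre : (List.isPrefixOf ['/'] (c :: r)) = false := by
        simp [List.isPrefixOf]
        intro hh
        exact absurd hh.symm hc
      have hf : PySem.Chars.find (c :: r) ['/'] =
          if PySem.Chars.find r ['/'] = -1 then -1 else PySem.Chars.find r ['/'] + 1 := by
        rw [PySem.Chars.find, PySem.Chars.find.go, hpre]
        simp only [Bool.false_eq_true, if_false]
        rw [ih 1]
        norm_num
      rw [PySem.Chars.find.go, hpre]
      simp only [Bool.false_eq_true, if_false]
      rw [ih (k + 1), hf]
      rcases find_ge r ['/'] with hge | hge <;> split_ifs <;> push_cast <;> omega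

theorem find_cons (c : Char) (t : List Char) :
    PySem.Chars.find (c :: t) ['/'] =
      if c = '/' then 0
      else if PySem.Chars.find t ['/'] = -1 then -1 else PySem.Chars.find t ['/'] + 1 := by
  by_cases hc : c = '/'
  · subst hc
    rw [if_pos rfl, PySem.Chars.find, PySem.Chars.find.go, if_pos (by simp [List.isPrefixOf])]
    norm_num
  · rw [if_neg hc, PySem.Chars.find, PySem.Chars.find.go,
      if_neg (by simp [List.isPrefixOf]; intro hh; exact absurd hh.symm hc)]
    rw [find_go_shift t 1]
    norm_num

theorem find_neg_iff_no_slash (cs : List Char) :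
    PySem.Chars.find cs ['/'] = -1 ↔ '/' ∉ cs := by
  induction cs with
  | nil => simp [PySem.Chars.find, PySem.Chars.find.go]
  | cons c t ih =>
    rw [find_cons]
    by_cases hc : c = '/'
    · subst hc; simp
    · rw [if_neg hc]
      by_cases h1 : PySem.Chars.find t ['/'] = -1
      · rw [if_pos h1]
        simp [ih.mp h1, Ne.symm hc]
      · rw [if_neg h1]
        have h2 : 0 ≤ PySem.Chars.find t ['/'] := by
          rcases find_ge t ['/'] with h | h; exact absurd h h1; exact h
        constructor
        · intro h; omega
        · intro h
          exact absurd (ih.mpr (fun hm => h (List.mem_cons_of_mem c hm))) h1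

theorem length_mySplit_eq_one_iff (cs : List Char) :
    (mySplit cs).length = 1 ↔ '/' ∉ cs := by
  induction cs with
  | nil => simp [mySplit]
  | cons c t ih =>
    by_cases hc : c = '/'
    · subst hc
      rw [show mySplit ('/' :: t) = [] :: mySplit t from by simp [mySplit]]
      have := mySplit_ne_nil t
      simp only [List.length_cons]
      constructor
      · intro h
        exact absurd (List.length_eq_zero_iff.mp (by omega)) this
      · intro h
        exact absurd (by simp : ('/' : Char) ∈ '/' :: t) h
    · simp only [mySplit, if_neg hc]
      cases hmt : mySplit t with
      | nil => exact absurd hmt (mySplit_ne_nil t)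
      | cons hh rr =>
        rw [hmt] at ih
        simp only [List.length_cons] at ih ⊢
        rw [ih]
        simp [Ne.symm hc]

-- A's front-branch loop body, on char lists
def stepF (cs : List Char) : List Char :=
  PySem.List.slice cs (some (PySem.Chars.find cs ['/'] + 1)) none

theorem stepF_eq (cs : List Char) :
    stepF cs = if (mySplit cs).length = 1 then cs
               else PySem.Chars.join ['/'] (mySplit cs).tail := by
  induction cs with
  | nil =>
    rw [stepF, show PySem.Chars.find [] ['/'] = -1 from by
      simp [PySem.Chars.find, PySem.Chars.find.go]]
    rw [show (-1 + 1 : ℤ) = ((0 : ℕ) : ℤ) from by norm_num, PySem.List.slice_from_natCast]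
    simp [mySplit]
  | cons c t ih =>
    by_cases hc : c = '/'
    · subst hc
      rw [stepF, find_cons, if_pos rfl]
      rw [show (0 + 1 : ℤ) = ((1 : ℕ) : ℤ) from by norm_num, PySem.List.slice_from_natCast]
      rw [show mySplit ('/' :: t) = [] :: mySplit t from by simp [mySplit]]
      have hne := mySplit_ne_nil t
      have hlen1 : ¬ ([] :: mySplit t).length = 1 := by
        simp only [List.length_cons]
        intro h
        exact hne (List.length_eq_zero_iff.mp (by omega))
      rw [if_neg hlen1]
      simpa using (join_mySplit t).symm
    · by_cases h1 : PySem.Chars.find t ['/'] = -1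
      · have hno : '/' ∉ c :: t := by
          intro h
          rcases List.mem_cons.mp h with h | h
          · exact hc h.symm
          · exact (find_neg_iff_no_slash t).mp h1 h
        rw [stepF, (find_neg_iff_no_slash (c :: t)).mpr hno]
        rw [show (-1 + 1 : ℤ) = ((0 : ℕ) : ℤ) from by norm_num, PySem.List.slice_from_natCast]
        rw [mySplit_no_slash _ hno]
        simp
      · have h2 : 0 ≤ PySem.Chars.find t ['/'] := by
          rcases find_ge t ['/'] with h | h; exact absurd h h1; exact h
        set n : ℕ := (PySem.Chars.find t ['/']).toNat with hn
        have hft : PySem.Chars.find t ['/'] = (n : ℤ) := by omega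
        have hfc : PySem.Chars.find (c :: t) ['/'] = ((n + 1 : ℕ) : ℤ) := by
          rw [find_cons, if_neg hc, if_neg h1, hft]; push_cast; ring
        have hslash : '/' ∈ t := by
          by_contra h
          exact h1 ((find_neg_iff_no_slash t).mpr h)
        have hlen : ¬ (mySplit t).length = 1 := by
          rw [length_mySplit_eq_one_iff]; simpa using hslash
        rw [stepF, hfc, show ((n + 1 : ℕ) : ℤ) + 1 = ((n + 2 : ℕ) : ℤ) from by push_cast; ring,
          PySem.List.slice_from_natCast]
        have hstep : stepF t = List.drop (n + 1) t := by
          rw [stepF, hft, show ((n : ℕ) : ℤ) + 1 = ((n + 1 : ℕ) : ℤ) from by push_cast; ring,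
            PySem.List.slice_from_natCast]
        rw [ih, if_neg hlen] at hstep
        cases hmt : mySplit t with
        | nil => exact absurd hmt (mySplit_ne_nil t)
        | cons hh rr =>
          simp only [mySplit, if_neg hc, hmt]
          rw [if_neg (by rw [hmt] at hlen; simpa using hlen)]
          rw [hmt] at hstep
          simp only [List.tail_cons] at hstep
          simpa using hstep.symm

theorem frontIter (n : ℕ) : ∀ cs : List Char,
    stepF^[n] cs =
      PySem.Chars.join ['/'] ((mySplit cs).drop (min n ((mySplit cs).length - 1))) := by
  induction n with
  | zero =>
    intro cs
    simp [join_mySplit]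
  | succ m ih =>
    intro cs
    rw [Function.iterate_succ_apply]
    by_cases h1 : (mySplit cs).length = 1
    · have hstep : stepF cs = cs := by rw [stepF_eq, if_pos h1]
      rw [hstep, ih cs, h1]
      simp
    · have hlen : 2 ≤ (mySplit cs).length := by
        have := mySplit_ne_nil cs
        have : 1 ≤ (mySplit cs).length := List.length_pos_iff.mpr this
        omega
      have hstep : stepF cs = PySem.Chars.join ['/'] (mySplit cs).tail := by
        rw [stepF_eq, if_neg h1]
      have htail : mySplit (stepF cs) = (mySplit cs).tail := by
        rw [hstep]
        refine mySplit_join _ ?_ ?_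
        · intro h
          have := congrArg List.length h
          simp at this
          omega
        · intro p hp
          exact mem_mySplit_no_slash cs p (List.mem_of_mem_tail hp)
      rw [ih (stepF cs), htail]
      rw [show (mySplit cs).tail = (mySplit cs).drop 1 from (List.drop_one).symm]
      simp only [List.length_drop, List.drop_drop]
      congr 2
      omega


-- ---- rfind / back-step lemmas ----

theorem singleton_prefix_iff (l : List Char) : ['/'] <+: l ↔ ∃ t, l = '/' :: t := by
  cases l with
  | nil => simp
  | cons c t =>
    rw [List.cons_prefix_cons]
    constructor
    · rintro ⟨rfl, -⟩; exact ⟨t, rfl⟩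
    · rintro ⟨t', ht⟩
      cases ht
      exact ⟨rfl, List.nil_prefix⟩

theorem rgo_spec (s : List Char) : ∀ m : ℕ,
    (PySem.Chars.rfind.go s ['/'] m = -1 ∧ ∀ j ≤ m, ¬ ['/'] <+: s.drop j) ∨
    (∃ j : ℕ, j ≤ m ∧ PySem.Chars.rfind.go s ['/'] m = (j : ℤ) ∧ ['/'] <+: s.drop j ∧
      ∀ i : ℕ, j < i → i ≤ m → ¬ ['/'] <+: s.drop i) := by
  intro m
  induction m with
  | zero =>
    by_cases h : List.isPrefixOf ['/'] s
    · right
      refine ⟨0, le_refl 0, ?_, ?_, ?_⟩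
      · rw [PySem.Chars.rfind.go, if_pos h]; norm_num
      · simpa using List.isPrefixOf_iff_prefix.mp h
      · intro i hi hi2 _; omega
    · left
      constructor
      · rw [PySem.Chars.rfind.go, if_neg h]
      · intro j hj
        have : j = 0 := by omega
        subst this
        simpa using fun hp => h (List.isPrefixOf_iff_prefix.mpr hp)
  | succ m ih =>
    by_cases h : List.isPrefixOf ['/'] (s.drop (m + 1))
    · right
      refine ⟨m + 1, le_refl _, ?_, ?_, ?_⟩
      · rw [PySem.Chars.rfind.go, if_pos h]
      · exact List.isPrefixOf_iff_prefix.mp h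
      · intro i hi hi2 _; omega
    · have hstep : PySem.Chars.rfind.go s ['/'] (m + 1) = PySem.Chars.rfind.go s ['/'] m := by
        rw [PySem.Chars.rfind.go, if_neg h]
      have hnot : ¬ ['/'] <+: s.drop (m + 1) := fun hp => h (List.isPrefixOf_iff_prefix.mpr hp)
      rcases ih with ⟨he, hall⟩ | ⟨j, hj, he, hp, hmax⟩
      · left
        refine ⟨by rw [hstep, he], ?_⟩
        intro i hi
        by_cases hi1 : i ≤ m
        · exact hall i hi1
        · have : i = m + 1 := by omega
          subst this; exact hnot
      · right
        refine ⟨j, by omega, by rw [hstep, he], hp, ?_⟩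
        intro i hji hi
        by_cases hi1 : i ≤ m
        · exact hmax i hji hi1
        · have : i = m + 1 := by omega
          subst this; exact hnot

theorem rfind_neg_of_no_slash (cs : List Char) (h : '/' ∉ cs) :
    PySem.Chars.rfind cs ['/'] = -1 := by
  rcases rgo_spec cs cs.length with ⟨he, -⟩ | ⟨j, hj, he, hp, -⟩
  · rw [PySem.Chars.rfind, he]
  · exfalso
    rcases (singleton_prefix_iff _).mp hp with ⟨t, ht⟩
    exact h (List.mem_of_mem_drop (by rw [ht]; simp))

theorem rfind_decomp (a b : List Char) (hb : '/' ∉ b) :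
    PySem.Chars.rfind (a ++ '/' :: b) ['/'] = (a.length : ℤ) := by
  set s := a ++ '/' :: b with hs
  have hlen : a.length ≤ s.length := by simp [hs]
  have hpa : ['/'] <+: s.drop a.length := by
    have hd : s.drop a.length = '/' :: b := by
      rw [hs]
      exact List.drop_left
    rw [hd, singleton_prefix_iff]
    exact ⟨b, rfl⟩
  have hafter : ∀ i : ℕ, a.length < i → ¬ ['/'] <+: s.drop i := by
    intro i hi hp
    rcases (singleton_prefix_iff _).mp hp with ⟨t, ht⟩
    have hmem : '/' ∈ s.drop i := by rw [ht]; simp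
    have hdi : s.drop i = b.drop (i - (a.length + 1)) := by
      have h3 : s = (a ++ ['/']) ++ b := by rw [hs, List.append_assoc]; rfl
      have h4 : i = (a ++ ['/']).length + (i - (a.length + 1)) := by
        simp only [List.length_append, List.length_cons, List.length_nil]
        omega
      rw [h3, h4, List.drop_append]
      rw [List.drop_eq_nil_of_le (by simp)]
      simp only [List.nil_append]
      congr 1
      simp only [List.length_append, List.length_cons, List.length_nil]
    rw [hdi] at hmem
    exact hb (List.mem_of_mem_drop hmem)
  rcases rgo_spec s s.length with ⟨he, hall⟩ | ⟨j, hj, he, hp, hmax⟩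
  · exact absurd hpa (hall a.length hlen)
  · have h1 : ¬ a.length < j := fun hlt => hafter j hlt hp
    have h2 : ¬ j < a.length := fun hlt => hmax a.length hlt hlen hpa
    have : j = a.length := by omega
    rw [PySem.Chars.rfind, he, this]

-- A's back-branch loop body, on char lists
def stepB (cs : List Char) : List Char :=
  if PySem.Chars.rfind cs ['/'] = -1 then []
  else PySem.List.slice cs (some 0) (some (PySem.Chars.rfind cs ['/']))

theorem join_append_singleton (init : List (List Char)) (p : List Char) (h : init ≠ []) :
    PySem.Chars.join ['/'] (init ++ [p]) = PySem.Chars.join ['/'] init ++ '/' :: p := by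
  induction init with
  | nil => exact absurd rfl h
  | cons q rest ih =>
    cases rest with
    | nil =>
      rw [show (([q] : List (List Char)) ++ [p]) = [q, p] from rfl]
      rw [PySem.Chars.join_cons_cons, PySem.Chars.join_singleton, PySem.Chars.join_singleton]
      simp
    | cons r rr =>
      rw [show ((q :: r :: rr) ++ [p]) = q :: ((r :: rr) ++ [p]) from rfl]
      rw [show ((r :: rr) ++ [p]) = r :: (rr ++ [p]) from rfl]
      rw [PySem.Chars.join_cons_cons]
      rw [show r :: (rr ++ [p]) = (r :: rr) ++ [p] from rfl]
      rw [ih (by simp)]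
      rw [PySem.Chars.join_cons_cons]
      simp

theorem stepB_eq (cs : List Char) :
    stepB cs = if (mySplit cs).length = 1 then []
               else PySem.Chars.join ['/'] (mySplit cs).dropLast := by
  by_cases h1 : (mySplit cs).length = 1
  · have hno : '/' ∉ cs := (length_mySplit_eq_one_iff cs).mp h1
    rw [stepB, if_pos (rfind_neg_of_no_slash cs hno), if_pos h1]
  · have hne := mySplit_ne_nil cs
    have hlen : 2 ≤ (mySplit cs).length := by
      have : 1 ≤ (mySplit cs).length := List.length_pos_iff.mpr hne
      omega
    set parts := mySplit cs with hparts
    have hsplit : parts = parts.dropLast ++ [parts.getLast hne] := (List.dropLast_append_getLast hne).symm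
    have hinit : parts.dropLast ≠ [] := by
      intro h
      have := congrArg List.length hsplit
      rw [h] at this
      simp at this
      omega
    have hcs : cs = PySem.Chars.join ['/'] parts.dropLast ++ '/' :: parts.getLast hne := by
      have h5 := join_mySplit cs
      rw [← hparts] at h5
      conv_lhs => rw [← h5]
      conv_lhs => rw [hsplit]
      rw [join_append_singleton _ _ hinit]
    have hblast : '/' ∉ parts.getLast hne :=
      mem_mySplit_no_slash cs _ (List.getLast_mem hne)
    have hrf : PySem.Chars.rfind cs ['/'] = ((PySem.Chars.join ['/'] parts.dropLast).length : ℤ) := by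
      rw [hcs]
      exact rfind_decomp _ _ hblast
    rw [stepB, if_neg (by rw [hrf]; omega), if_neg h1, hrf]
    rw [PySem.List.slice_zero_start, PySem.List.slice_to cs (by positivity)]
    simp only [Int.toNat_natCast]
    conv_lhs => rw [hcs]
    simp

theorem stepB_nil_iter (n : ℕ) : stepB^[n] ([] : List Char) = [] := by
  induction n with
  | zero => rfl
  | succ m ih =>
    rw [Function.iterate_succ_apply]
    rw [show stepB [] = [] from by rw [stepB, if_pos (rfind_neg_of_no_slash [] (by simp))]]
    exact ih

theorem backIter (n : ℕ) : ∀ cs : List Char,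
    stepB^[n] cs =
      if n < (mySplit cs).length
      then PySem.Chars.join ['/'] ((mySplit cs).take ((mySplit cs).length - n))
      else [] := by
  induction n with
  | zero =>
    intro cs
    have : 1 ≤ (mySplit cs).length := List.length_pos_iff.mpr (mySplit_ne_nil cs)
    rw [if_pos (by omega)]
    simp [join_mySplit]
  | succ m ih =>
    intro cs
    rw [Function.iterate_succ_apply]
    by_cases h1 : (mySplit cs).length = 1
    · have hstep : stepB cs = [] := by rw [stepB_eq, if_pos h1]
      rw [hstep, stepB_nil_iter, if_neg (by omega)]
    · have hne := mySplit_ne_nil cs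
      have hlen : 2 ≤ (mySplit cs).length := by
        have : 1 ≤ (mySplit cs).length := List.length_pos_iff.mpr hne
        omega
      have hstep : stepB cs = PySem.Chars.join ['/'] (mySplit cs).dropLast := by
        rw [stepB_eq, if_neg h1]
      have hsp : mySplit (stepB cs) = (mySplit cs).dropLast := by
        rw [hstep]
        refine mySplit_join _ ?_ ?_
        · intro h
          have := congrArg List.length h
          simp at this
          omega
        · intro p hp
          exact mem_mySplit_no_slash cs p (List.mem_of_mem_dropLast hp)
      rw [ih (stepB cs), hsp]
      simp only [List.length_dropLast]
      by_cases h2 : m + 1 < (mySplit cs).length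
      · rw [if_pos (by omega), if_pos h2]
        congr 1
        rw [List.dropLast_eq_take, List.take_take]
        congr 1
        omega
      · rw [if_neg (by omega), if_neg h2]


-- ---- bridges between the String-level ports and the List Char lemmas ----

theorem foldl_const_iterate {α β : Type} (f : β → β) (l : List α) : ∀ x : β,
    l.foldl (fun s _ => f s) x = f^[l.length] x := by
  induction l with
  | nil => intro x; rfl
  | cons a t ih =>
    intro x
    rw [List.foldl_cons, ih, List.length_cons, Function.iterate_succ_apply]

theorem length_pyRange0 (c : ℤ) : (PySem.List.pyRange 0 c).length = c.toNat := by
  by_cases h : 0 < c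
  · simp [PySem.List.pyRange, h]
  · simp [PySem.List.pyRange, h]
    omega

theorem iterate_ofList (f : List Char → List Char) (g : String → String)
    (h : ∀ s : String, g s = String.ofList (f s.toList)) (n : ℕ) : ∀ s : String,
    g^[n] s = String.ofList (f^[n] s.toList) := by
  induction n with
  | zero => intro s; simp
  | succ m ih =>
    intro s
    rw [Function.iterate_succ_apply, Function.iterate_succ_apply, ih, h]
    simp

theorem strStepF (s : String) :
    PySem.Str.slice s (some (PySem.Str.find s "/" + 1)) none = String.ofList (stepF s.toList) := by
  rw [PySem.Str.slice, PySem.Str.find, stepF, PySem.Chars.slice]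
  rfl

theorem strStepB (s : String) :
    (if PySem.Str.rfind s "/" == -1 then ""
     else PySem.Str.slice s (some 0) (some (PySem.Str.rfind s "/")))
      = String.ofList (stepB s.toList) := by
  rw [stepB, PySem.Str.rfind_eq]
  by_cases h : PySem.Chars.rfind s.toList ['/'] = -1
  · rw [if_pos (by simpa using h), if_pos (by simpa using h)]
  · rw [if_neg (by simpa using h), if_neg (by simpa using h)]
    rw [PySem.Str.slice]
    rfl

theorem split_parts (s : String) :
    (PySem.Str.split? s "/").getD [] = (mySplit s.toList).map String.ofList := by
  rw [PySem.Str.split?.eq_1, PySem.Chars.split?.eq_1]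
  rw [if_neg (by simp), show ("/" : String).toList = ['/'] from rfl, splitOn_eq]
  rfl

theorem join_parts (ps : List (List Char)) :
    PySem.Str.join "/" (ps.map String.ofList) = String.ofList (PySem.Chars.join ['/'] ps) := by
  rw [PySem.Str.join.eq_1, show ("/" : String).toList = ['/'] from rfl]
  congr 1
  rw [List.map_map]
  have h : (String.toList ∘ String.ofList) = fun l : List Char => l := by
    funext l
    simp
  rw [h, List.map_id']

-- ===== VERDICT (by name: the statement is the Claim_ definition above) =====
theorem stripsection_spec : Claim_equal_stripsection := by
  unfold Claim_equal_stripsection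
  intro sect count start _
  unfold Spec_stripsection stripsection stripsection_alt
  rw [split_parts]
  have hL1 : 1 ≤ (mySplit sect.toList).length :=
    List.length_pos_iff.mpr (mySplit_ne_nil sect.toList)
  have hc : (if count > 0 then count else 0) = (count.toNat : ℤ) := by
    split_ifs <;> omega
  by_cases hst : (start == 0) = true
  · rw [if_pos hst, if_pos hst]
    rw [foldl_const_iterate, length_pyRange0,
      iterate_ofList stepF _ strStepF count.toNat sect, frontIter count.toNat sect.toList]
    simp only [List.length_map]
    have hkeep : (0 : ℤ) ≤ min (if count > 0 then count else 0)
        (((mySplit sect.toList).length : ℤ) - 1) := by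
      rw [hc]
      omega
    rw [PySem.List.slice_from _ hkeep, ← List.map_drop, join_parts]
    congr 2
    rw [hc]
    congr 1
    omega
  · rw [if_neg hst, if_neg hst]
    rw [foldl_const_iterate
      (fun s => if PySem.Str.rfind s "/" == -1 then ""
                else PySem.Str.slice s (some 0) (some (PySem.Str.rfind s "/"))),
      length_pyRange0]
    rw [iterate_ofList stepB _ strStepB count.toNat sect, backIter count.toNat sect.toList]
    simp only [List.length_map]
    by_cases hrem : (((mySplit sect.toList).length : ℤ)
        - (if count > 0 then count else 0)) > 0
    · rw [if_pos hrem, if_pos (by rw [hc] at hrem; omega)]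
      rw [PySem.List.slice_to _ (le_of_lt hrem), ← List.map_take, join_parts]
      congr 2
      rw [hc]
      congr 1
      omega
    · rw [if_neg hrem, if_neg (by rw [hc] at hrem; omega)]
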